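-- pv_equiv track=rewrite | github.com/rbergmair/PyPES | src/pypes/infer/_evaluation/score/score_decisions.py | _marginals
-- ===== SOURCE A (Python) =====
-- def _marginals( contingency_table ):
--
--   marginal_left = {};
--   marginal_right = {};
--
--   for ( left, subtable )  in contingency_table.items():
--
--     for ( right, cnt ) in subtable.items():
--
--       if not left in marginal_left:
--         marginal_left[ left ] = 0;
--       marginal_left[ left ] += cnt;
--
--       if not right in marginal_right:
--         marginal_right[ right ] = 0;
--       marginal_right[ right ] += cnt;
--
--   return ( marginal_left, marginal_right );
-- ===== SOURCE B (Python) =====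
-- def _marginals(contingency_table):
--     # flatten the table to (left, right, cnt) cell triples
--     cells = [(left, right, cnt)
--              for (left, subtable) in contingency_table.items()
--              for (right, cnt) in subtable.items()]
--     # distinct keys of each axis, in first-occurrence order
--     lefts = dict.fromkeys(l for (l, _, _) in cells)
--     rights = dict.fromkeys(r for (_, r, _) in cells)
--     # per-key brute-force sum over the flat cell list
--     marginal_left = {l: sum(c for (ll, _, c) in cells if ll == l) for l in lefts}
--     marginal_right = {r: sum(c for (_, rr, c) in cells if rr == r) for r in rights}
--     return (marginal_left, marginal_right)
-- ===== Notes on version B (the rewrite author's own statement) =====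
-- stated objective: alternative
-- what changed: A builds both marginals incrementally in one fused nested loop over the dict-of-dicts with membership-test-then-increment updates; B flattens the table to a list of (left,right,cnt) cell triples, dedups each key axis with dict.fromkeys, and computes each marginal as a per-key brute-force sum over the flat cell list, with no incremental dict updates.
import Mathlib
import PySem

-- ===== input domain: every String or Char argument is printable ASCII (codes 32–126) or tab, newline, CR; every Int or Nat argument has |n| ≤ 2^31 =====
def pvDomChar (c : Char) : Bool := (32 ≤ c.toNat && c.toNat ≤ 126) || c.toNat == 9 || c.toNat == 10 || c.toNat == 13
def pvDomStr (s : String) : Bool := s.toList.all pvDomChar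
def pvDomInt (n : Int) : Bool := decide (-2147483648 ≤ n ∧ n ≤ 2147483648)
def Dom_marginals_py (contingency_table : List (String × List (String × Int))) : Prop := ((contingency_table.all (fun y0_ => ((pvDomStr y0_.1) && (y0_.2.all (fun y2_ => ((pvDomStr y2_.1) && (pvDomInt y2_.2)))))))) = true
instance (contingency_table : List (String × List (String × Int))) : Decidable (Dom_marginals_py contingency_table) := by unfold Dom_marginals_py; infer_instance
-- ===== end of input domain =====

-- B replaces A's fused incremental-dict loop by flatten-to-cells, dedup of each key
-- axis, and a per-key brute-force sum over the flat cell list: a different algorithm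
-- of the same observable behaviour (not faster).

-- ===== PORT A =====
-- one fused nested loop over cells, updating both dicts with "if absent, set 0; then += cnt"
def marginals_py (contingency_table : List (String × List (String × Int))) : (List (String × Int)) × (List (String × Int)) :=
  let st := contingency_table.foldl
    (fun (st : PySem.Dict String Int × PySem.Dict String Int) row =>
      row.2.foldl
        (fun st cell =>
          (let ml := if st.1.contains row.1 = false then st.1.insert row.1 0 else st.1
           ml.insert row.1 (ml.getD row.1 0 + cell.2),
           let mr := if st.2.contains cell.1 = false then st.2.insert cell.1 0 else st.2
           mr.insert cell.1 (mr.getD cell.1 0 + cell.2)))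
        st)
    (PySem.Dict.empty, PySem.Dict.empty)
  (st.1.items, st.2.items)

-- ===== PORT B =====
def marginals_py_alt (contingency_table : List (String × List (String × Int))) : (List (String × Int)) × (List (String × Int)) :=
  -- cells = [(left, right, cnt) for …]
  let cells := contingency_table.flatMap
    (fun row => row.2.map (fun cell => (row.1, cell.1, cell.2)))
  -- lefts / rights = dict.fromkeys(…) used as ordered dedup
  let lefts := PySem.List.dedup (cells.map (·.1))
  let rights := PySem.List.dedup (cells.map (·.2.1))
  -- per-key comprehension: {k: sum(c for matching cells)}
  (lefts.map (fun l => (l, ((cells.filter (fun t => t.1 == l)).map (·.2.2)).sum)),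
   rights.map (fun r => (r, ((cells.filter (fun t => t.2.1 == r)).map (·.2.2)).sum)))

-- ===== PRECONDITION & SPEC =====
def Spec_marginals_py (contingency_table : List (String × List (String × Int))) (out : (List (String × Int)) × (List (String × Int))) : Prop := out = marginals_py_alt contingency_table
instance (contingency_table : List (String × List (String × Int))) (out : (List (String × Int)) × (List (String × Int))) : Decidable (Spec_marginals_py contingency_table out) := by unfold Spec_marginals_py; infer_instance

-- ===== CLAIM (what is proved, stated in full; the proofs are below) =====
def Claim_equal_marginals_py : Prop := ∀ (contingency_table : List (String × List (String × Int))), Dom_marginals_py contingency_table → Spec_marginals_py contingency_table (marginals_py contingency_table)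

-- ===== LEMMAS AND PROOFS =====

-- A's two-step "if absent set 0, then += c" update collapses to one insert
theorem pv_stepU_eq (d : PySem.Dict String Int) (k : String) (c : Int) :
    (let d' := if d.contains k = false then d.insert k 0 else d
     d'.insert k (d'.getD k 0 + c)) = d.insert k (d.getD k 0 + c) := by
  cases h : d.contains k with
  | false =>
      rw [if_pos rfl]
      show (d.insert k 0).insert k ((d.insert k 0).getD k 0 + c) = d.insert k (d.getD k 0 + c)
      rw [PySem.Dict.getD_insert_self, PySem.Dict.insert_insert_self,
        PySem.Dict.getD_of_not_contains d 0 h, zero_add]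
  | true => simp

-- the lookup in an accumulation fold is the initial value plus the matching sum
theorem pv_getD_acc (ps : List (String × Int)) :
    ∀ (d : PySem.Dict String Int) (k : String),
    (ps.foldl (fun d p => d.insert p.1 (d.getD p.1 0 + p.2)) d).getD k 0
      = d.getD k 0 + ((ps.filter (fun p => p.1 == k)).map (·.2)).sum := by
  induction ps with
  | nil => simp
  | cons p ps ih =>
      intro d k
      simp only [List.foldl_cons, List.filter_cons, ih, PySem.Dict.getD_insert]
      by_cases h : p.1 = k
      · subst h; simp [add_assoc]
      · simp [h, Ne.symm h]

-- the accumulation fold's items are the deduped keys paired with their sums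
theorem pv_items_acc (ps : List (String × Int)) :
    (ps.foldl (fun d p => d.insert p.1 (d.getD p.1 0 + p.2)) PySem.Dict.empty).items
      = (PySem.List.dedup (ps.map (·.1))).map
          (fun k => (k, ((ps.filter (fun p => p.1 == k)).map (·.2)).sum)) := by
  have hnd : (ps.foldl (fun d p => d.insert p.1 (d.getD p.1 0 + p.2)) PySem.Dict.empty).keys.Nodup :=
    PySem.Dict.nodup_keys_foldl_insert_key ps (·.1) _ _ (by simp)
  rw [PySem.Dict.items_eq_map_keys _ hnd 0,
    PySem.Dict.keys_foldl_insert_key]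
  have hkeys : PySem.Set.update (PySem.Dict.empty : PySem.Dict String Int).keys (ps.map (·.1))
      = PySem.List.dedup (ps.map (·.1)) := by
    simp [PySem.Dict.keys_empty, PySem.Set.update_nil_left, PySem.List.dedup]
  rw [hkeys]
  refine List.map_congr_left (fun k _ => ?_)
  rw [pv_getD_acc]
  simp

-- a nested fold over per-row flattened pairs is the fold over the flat list
theorem pv_fold_flat (key : String → String × Int → String × Int)
    (ct : List (String × List (String × Int))) (d : PySem.Dict String Int) :
    ct.foldl (fun d row =>
        row.2.foldl (fun (d : PySem.Dict String Int) cell =>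
          d.insert (key row.1 cell).1 (d.getD (key row.1 cell).1 0 + (key row.1 cell).2)) d) d
      = (ct.flatMap (fun row => row.2.map (fun cell => key row.1 cell))).foldl
          (fun d p => d.insert p.1 (d.getD p.1 0 + p.2)) d := by
  induction ct generalizing d with
  | nil => rfl
  | cons row rest ih =>
      simp only [List.flatMap_cons, List.foldl_cons, List.foldl_append, List.foldl_map]
      rw [ih]

-- ===== VERDICT (by name: the statement is the Claim_ definition above) =====
theorem marginals_py_spec : Claim_equal_marginals_py := by
  intro ct _
  unfold Spec_marginals_py marginals_py marginals_py_alt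
  have hstep : ∀ (k : String) (c : Int) (d : PySem.Dict String Int),
      (let d' := if d.contains k = false then d.insert k 0 else d
       d'.insert k (d'.getD k 0 + c)) = d.insert k (d.getD k 0 + c) :=
    fun k c d => pv_stepU_eq d k c
  -- split the fused pair fold into two independent accumulation folds
  have hsplit :
      ct.foldl
        (fun (st : PySem.Dict String Int × PySem.Dict String Int) row =>
          row.2.foldl
            (fun st cell =>
              (let ml := if st.1.contains row.1 = false then st.1.insert row.1 0 else st.1
               ml.insert row.1 (ml.getD row.1 0 + cell.2),
               let mr := if st.2.contains cell.1 = false then st.2.insert cell.1 0 else st.2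
               mr.insert cell.1 (mr.getD cell.1 0 + cell.2)))
            st)
        (PySem.Dict.empty, PySem.Dict.empty)
      = (ct.foldl (fun d row =>
            row.2.foldl (fun (d : PySem.Dict String Int) cell =>
              d.insert row.1 (d.getD row.1 0 + cell.2)) d) PySem.Dict.empty,
         ct.foldl (fun d row =>
            row.2.foldl (fun (d : PySem.Dict String Int) cell =>
              d.insert cell.1 (d.getD cell.1 0 + cell.2)) d) PySem.Dict.empty) := by
    simp only [hstep]
    rw [← PySem.List.foldl_prod_mk]
    apply PySem.List.foldl_congr_mem
    intro st row _
    exact PySem.List.foldl_prod_mk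
      (fun d cell => d.insert row.1 (d.getD row.1 0 + cell.2))
      (fun d cell => d.insert cell.1 (d.getD cell.1 0 + cell.2))
      row.2 st.1 st.2
  rw [hsplit]
  -- turn each nested fold into a fold over flat (key, cnt) pairs and characterise it
  have hL := pv_fold_flat (fun l cell => (l, cell.2)) ct PySem.Dict.empty
  have hR := pv_fold_flat (fun _ cell => cell) ct PySem.Dict.empty
  simp only at hL hR
  rw [hL, hR]
  dsimp only
  rw [pv_items_acc, pv_items_acc]
  -- relate the two flattened pair lists to B's triple list 'cells'
  have hmapL : (ct.flatMap fun row => row.2.map fun cell => ((row.1, cell.2) : String × Int))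
      = (ct.flatMap fun row => row.2.map fun cell => (row.1, cell.1, cell.2)).map
          (fun t => (t.1, t.2.2)) := by
    simp [List.map_flatMap, Function.comp_def]
  have hmapR : (ct.flatMap fun row => row.2.map fun cell => cell)
      = (ct.flatMap fun row => row.2.map fun cell => (row.1, cell.1, cell.2)).map
          (fun t => t.2) := by
    simp [List.map_flatMap, Function.comp_def]
  rw [hmapL, hmapR]
  simp only [List.map_map, List.filter_map, Function.comp_def]
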